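-- pv_equiv track=rewrite | github.com/iteebz/anthropic-eval | python/src/agentinterface/selector.py | _extract_cards_from_content
-- ===== SOURCE A (Python) =====
-- from typing import Dict, Any, Optional, List
--
-- def _extract_cards_from_content(content: str) -> List[Dict[str, Any]]:
--     """Extract card data from content - simplified implementation."""
--     # This is a simplified version - in practice, would use more sophisticated parsing
--     lines = content.split('\n')
--     cards = []
--
--     current_card = {}
--     for line in lines:
--         line = line.strip()
--         if line.startswith('### ') or line.startswith('## '):
--             if current_card:
--                 cards.append(current_card)
--             current_card = {"title": line.replace('#', '').strip(), "content": ""}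
--         elif line and current_card:
--             current_card["content"] += line + " "
--
--     if current_card:
--         cards.append(current_card)
--
--     return cards if cards else [{"title": "Content", "content": content}]
-- ===== SOURCE B (Python) =====
-- def _is_heading(line):
--     return line.startswith('### ') or line.startswith('## ')
--
--
-- def _extract_cards_from_content(content):
--     """Parse headings into cards by scanning heading-delimited segments."""
--     lines = [ln.strip() for ln in content.split('\n')]
--     i = 0
--     while i < len(lines) and not _is_heading(lines[i]):
--         i += 1
--     if i == len(lines):
--         return [{"title": "Content", "content": content}]
--     cards = []
--     while i < len(lines):
--         title = lines[i].replace('#', '').strip()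
--         i += 1
--         body = []
--         while i < len(lines) and not _is_heading(lines[i]):
--             if lines[i]:
--                 body.append(lines[i] + ' ')
--             i += 1
--         cards.append({"title": title, "content": ''.join(body)})
--     return cards
-- ===== Notes on version B (the rewrite author's own statement) =====
-- stated objective: alternative
-- what changed: Replaces A's single fold carrying a mutable current-card accumulator with a segment-based parser: skip the preamble, then for each heading take the whole block of lines up to the next heading and build that card at once.
import Mathlib
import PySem

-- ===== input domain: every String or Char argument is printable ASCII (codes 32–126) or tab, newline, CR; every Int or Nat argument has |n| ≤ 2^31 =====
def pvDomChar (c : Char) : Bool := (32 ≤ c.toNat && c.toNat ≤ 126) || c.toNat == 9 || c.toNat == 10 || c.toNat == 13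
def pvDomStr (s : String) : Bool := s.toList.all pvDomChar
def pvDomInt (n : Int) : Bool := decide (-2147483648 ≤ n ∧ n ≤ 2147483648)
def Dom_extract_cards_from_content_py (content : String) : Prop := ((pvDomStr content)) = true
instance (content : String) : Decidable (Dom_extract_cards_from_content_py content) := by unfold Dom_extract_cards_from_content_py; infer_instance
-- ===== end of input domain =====

-- B replaces A's fold over lines with a mutable current-card accumulator by a
-- segment-based parser (skip preamble, then one card per heading-delimited block);
-- objective: alternative decomposition, same cost.

-- ===== PORT A =====
-- A's loop body: strip the line, open/extend/skip the current card.
def pvStepA (st : List (List (String × String)) × Option (String × String)) (line0 : String) :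
    List (List (String × String)) × Option (String × String) :=
  let line := PySem.Str.strip line0
  if PySem.Str.startswith line "### " || PySem.Str.startswith line "## " then
    ((match st.2 with
      | some c => st.1 ++ [[("title", c.1), ("content", c.2)]]
      | none => st.1),
     some (PySem.Str.strip (PySem.Str.replace line "#" ""), ""))
  else if line ≠ "" then
    match st.2 with
    | some c => (st.1, some (c.1, c.2 ++ line ++ " "))
    | none => st
  else st

def extract_cards_from_content_py (content : String) : List (List (String × String)) :=
  let lines := (PySem.Str.split? content "\n").getD []
  let st := lines.foldl pvStepA ([], none)
  let cards := match st.2 with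
    | some c => st.1 ++ [[("title", c.1), ("content", c.2)]]
    | none => st.1
  if cards ≠ [] then cards else [[("title", "Content"), ("content", content)]]

-- ===== PORT B =====
def pvIsHeading (line : String) : Bool :=
  PySem.Str.startswith line "### " || PySem.Str.startswith line "## "

-- ''.join of (ln + ' ') over the non-empty lines of a block
def pvJoinBody : List String → String
  | [] => ""
  | l :: ls => (if l ≠ "" then l ++ " " else "") ++ pvJoinBody ls

-- one card per heading-delimited segment
def pvParseCards : List String → List (List (String × String))
  | [] => []
  | h :: rest =>
    [("title", PySem.Str.strip (PySem.Str.replace h "#" "")),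
     ("content", pvJoinBody (rest.takeWhile (fun l => !pvIsHeading l)))]
    :: pvParseCards (rest.dropWhile (fun l => !pvIsHeading l))
termination_by ls => ls.length
decreasing_by
  exact Nat.lt_succ_of_le (List.length_dropWhile_le _ _)

def extract_cards_from_content_py_alt (content : String) : List (List (String × String)) :=
  let lines := ((PySem.Str.split? content "\n").getD []).map PySem.Str.strip
  let rest := lines.dropWhile (fun l => !pvIsHeading l)
  if rest = [] then [[("title", "Content"), ("content", content)]] else pvParseCards rest

-- ===== PRECONDITION & SPEC =====
def Spec_extract_cards_from_content_py (content : String) (out : List (List (String × String))) : Prop := out = extract_cards_from_content_py_alt content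
instance (content : String) (out : List (List (String × String))) : Decidable (Spec_extract_cards_from_content_py content out) := by unfold Spec_extract_cards_from_content_py; infer_instance

-- ===== CLAIM (what is proved, stated in full; the proofs are below) =====
def Claim_equal_extract_cards_from_content_py : Prop := ∀ (content : String), Dom_extract_cards_from_content_py content → Spec_extract_cards_from_content_py content (extract_cards_from_content_py content)

-- ===== LEMMAS AND PROOFS =====

-- A's step on a pre-stripped line
def pvStepS (st : List (List (String × String)) × Option (String × String)) (line : String) :
    List (List (String × String)) × Option (String × String) :=
  if pvIsHeading line then
    ((match st.2 with
      | some c => st.1 ++ [[("title", c.1), ("content", c.2)]]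
      | none => st.1),
     some (PySem.Str.strip (PySem.Str.replace line "#" ""), ""))
  else if line ≠ "" then
    match st.2 with
    | some c => (st.1, some (c.1, c.2 ++ line ++ " "))
    | none => st
  else st

def pvFinalize (st : List (List (String × String)) × Option (String × String)) :
    List (List (String × String)) :=
  match st.2 with
  | some c => st.1 ++ [[("title", c.1), ("content", c.2)]]
  | none => st.1

theorem pvParseCards_cons (h : String) (rest : List String) :
    pvParseCards (h :: rest) =
      [("title", PySem.Str.strip (PySem.Str.replace h "#" "")),
       ("content", pvJoinBody (rest.takeWhile (fun l => !pvIsHeading l)))]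
      :: pvParseCards (rest.dropWhile (fun l => !pvIsHeading l)) := by
  rw [pvParseCards]

theorem pvFoldS_none (ls : List String) :
    List.foldl pvStepS ([], none) ls =
      List.foldl pvStepS ([], none) (ls.dropWhile (fun l => !pvIsHeading l)) := by
  induction ls with
  | nil => rfl
  | cons l ls ih =>
    by_cases h : pvIsHeading l = true
    · simp [h]
    · have hstep : pvStepS ([], none) l = ([], none) := by
        simp only [pvStepS, h]
        split <;> simp_all
      simp only [Bool.not_eq_true] at h
      simp [h, List.foldl_cons, hstep, ih]

theorem pvFoldS_some (ls : List String) :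
    ∀ (cards : List (List (String × String))) (t c : String),
    pvFinalize (List.foldl pvStepS (cards, some (t, c)) ls) =
      cards ++ ([("title", t),
                 ("content", c ++ pvJoinBody (ls.takeWhile (fun l => !pvIsHeading l)))]
        :: pvParseCards (ls.dropWhile (fun l => !pvIsHeading l))) := by
  induction ls with
  | nil => intro cards t c; simp [pvFinalize, pvJoinBody, pvParseCards]
  | cons l ls ih =>
    intro cards t c
    by_cases h : pvIsHeading l = true
    · have hstep : pvStepS (cards, some (t, c)) l =
          (cards ++ [[("title", t), ("content", c)]],
           some (PySem.Str.strip (PySem.Str.replace l "#" ""), "")) := by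
        simp [pvStepS, h]
      have ht : List.takeWhile (fun l => !pvIsHeading l) (l :: ls) = [] := by simp [h]
      have hdw : List.dropWhile (fun l => !pvIsHeading l) (l :: ls) = l :: ls := by simp [h]
      rw [List.foldl_cons, hstep, ih, ht, hdw, pvParseCards_cons]
      simp [pvJoinBody]
    · have hpf : pvIsHeading l = false := by simpa using h
      have ht : List.takeWhile (fun l => !pvIsHeading l) (l :: ls) =
          l :: List.takeWhile (fun l => !pvIsHeading l) ls := by simp [hpf]
      have hdw : List.dropWhile (fun l => !pvIsHeading l) (l :: ls) =
          List.dropWhile (fun l => !pvIsHeading l) ls := by simp [hpf]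
      by_cases he : l = ""
      · subst he
        have hstep : pvStepS (cards, some (t, c)) "" = (cards, some (t, c)) := by
          simp [pvStepS, hpf]
        rw [List.foldl_cons, hstep, ih, ht, hdw]
        simp [pvJoinBody]
      · have hstep : pvStepS (cards, some (t, c)) l = (cards, some (t, c ++ l ++ " ")) := by
          simp [pvStepS, hpf, he]
        rw [List.foldl_cons, hstep, ih, ht, hdw]
        simp [pvJoinBody, he, String.append_assoc]

theorem pvDropWhile_head {p : String → Bool} {ls : List String} {h : String} {rest : List String}
    (hd : ls.dropWhile p = h :: rest) : p h = false := by
  induction ls with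
  | nil => simp at hd
  | cons x xs ih =>
    rw [List.dropWhile_cons] at hd
    split at hd
    · exact ih hd
    · next hx => cases hd; simpa using hx

theorem pvA_eq (sl : List String) (fb : List (List (String × String))) :
    (if pvFinalize (List.foldl pvStepS ([], none) sl) ≠ [] then
       pvFinalize (List.foldl pvStepS ([], none) sl)
     else fb) =
    (if sl.dropWhile (fun l => !pvIsHeading l) = [] then fb
     else pvParseCards (sl.dropWhile (fun l => !pvIsHeading l))) := by
  rw [pvFoldS_none]
  cases hd : sl.dropWhile (fun l => !pvIsHeading l) with
  | nil => simp [pvFinalize]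
  | cons h rest =>
    have hh : pvIsHeading h = true := by
      have := pvDropWhile_head hd; simpa using this
    have hstep : pvStepS ([], none) h =
        ([], some (PySem.Str.strip (PySem.Str.replace h "#" ""), "")) := by
      simp [pvStepS, hh]
    have hfin := pvFoldS_some rest [] (PySem.Str.strip (PySem.Str.replace h "#" "")) ""
    rw [List.foldl_cons, hstep, hfin, pvParseCards_cons]
    simp

-- ===== VERDICT (by name: the statement is the Claim_ definition above) =====
theorem extract_cards_from_content_py_spec : Claim_equal_extract_cards_from_content_py := by
  intro content _
  unfold Spec_extract_cards_from_content_py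
  have hmap : List.foldl pvStepA ([], none) ((PySem.Str.split? content "\n").getD []) =
      List.foldl pvStepS ([], none)
        (((PySem.Str.split? content "\n").getD []).map PySem.Str.strip) := by
    rw [List.foldl_map]
    rfl
  have h1 : extract_cards_from_content_py content =
      (if pvFinalize (List.foldl pvStepS ([], none)
            (((PySem.Str.split? content "\n").getD []).map PySem.Str.strip)) ≠ [] then
         pvFinalize (List.foldl pvStepS ([], none)
            (((PySem.Str.split? content "\n").getD []).map PySem.Str.strip))
       else [[("title", "Content"), ("content", content)]]) := by
    rw [show extract_cards_from_content_py content =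
        (if pvFinalize (List.foldl pvStepA ([], none)
              ((PySem.Str.split? content "\n").getD [])) ≠ [] then
           pvFinalize (List.foldl pvStepA ([], none)
              ((PySem.Str.split? content "\n").getD []))
         else [[("title", "Content"), ("content", content)]]) from rfl, hmap]
  have h2 : extract_cards_from_content_py_alt content =
      (if (((PySem.Str.split? content "\n").getD []).map PySem.Str.strip).dropWhile
            (fun l => !pvIsHeading l) = [] then
         [[("title", "Content"), ("content", content)]]
       else pvParseCards ((((PySem.Str.split? content "\n").getD []).map
            PySem.Str.strip).dropWhile (fun l => !pvIsHeading l))) := rfl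
  rw [h1, h2, pvA_eq]
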